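-- pv_equiv track=rewrite | github.com/sbeetsma/myRepository | AI/mastermind/Opdracht 1b.py | generatecombinationslist
-- ===== SOURCE A (Python) =====
-- import string
--
-- def generatecombinationslist(number_of_colors=6):
--     """ Genereer alle mogelijke combinaties. Returnt een lijst met alle combinaties. Het aantal kleuren kan veranderen
--     maar de code kan alleen 4 characters lang zijn"""
--     characters = []
--     for i in range(number_of_colors):
--         characters.append(string.ascii_lowercase[i])
--     all_combinations = []
--     for i in range(number_of_colors):
--         first = characters[i]
--         for i in range(number_of_colors):
--             second = characters[i]
--             for i in range(number_of_colors):
--                 third = characters[i]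
--                 for i in range(number_of_colors):
--                     fourth = characters[i]
--                     all_combinations.append([first, second, third, fourth])
--     return all_combinations
-- ===== SOURCE B (Python) =====
-- import string
--
-- def generatecombinationslist(number_of_colors=6):
--     """ Genereer alle mogelijke combinaties, recursively instead of four nested loops. """
--     characters = [string.ascii_lowercase[i] for i in range(number_of_colors)]
--
--     def build(k, prefix):
--         if k == 0:
--             return [prefix]
--         out = []
--         for c in characters:
--             out.extend(build(k - 1, prefix + [c]))
--         return out
--
--     return build(4, [])
-- ===== Notes on version B (the rewrite author's own statement) =====
-- stated objective: alternative
-- what changed: Replaces A's four hard-coded nested index loops with a recursive prefix builder build(k, prefix) over the character list, collecting the same n^4 combinations in the same order.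
import Mathlib
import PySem

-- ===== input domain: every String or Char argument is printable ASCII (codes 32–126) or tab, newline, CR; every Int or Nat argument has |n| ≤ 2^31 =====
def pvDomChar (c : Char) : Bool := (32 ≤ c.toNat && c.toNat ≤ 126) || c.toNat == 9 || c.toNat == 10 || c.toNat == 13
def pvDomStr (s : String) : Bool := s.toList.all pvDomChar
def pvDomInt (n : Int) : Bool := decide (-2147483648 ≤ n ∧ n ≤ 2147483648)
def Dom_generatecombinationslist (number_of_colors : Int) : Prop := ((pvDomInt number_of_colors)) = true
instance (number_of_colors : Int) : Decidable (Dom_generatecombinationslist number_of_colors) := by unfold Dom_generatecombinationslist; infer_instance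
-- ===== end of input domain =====

-- B replaces A's four nested index loops by a recursive prefix builder over the same character list;
-- objective: alternative decomposition (same n^4 cost, same output order).

-- ===== PORT A =====
-- string.ascii_lowercase[i] yields a ONE-CHARACTER str; we model it as a one-character String
-- (exact: Str.pyGet? returns the char, String.ofList [c] is that one-character string).
def pvLowerAt (i : Int) : String :=
  ((PySem.Str.pyGet? "abcdefghijklmnopqrstuvwxyz" i).map (fun c => String.ofList [c])).getD ""

def generatecombinationslist (number_of_colors : Int) : List (List String) :=
  let characters := (PySem.List.pyRange 0 number_of_colors 1).foldl
      (fun cs i => cs ++ [pvLowerAt i]) []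
  (PySem.List.pyRange 0 number_of_colors 1).foldl (fun acc i =>
    let first := PySem.List.pyGetD characters i ""
    (PySem.List.pyRange 0 number_of_colors 1).foldl (fun acc i =>
      let second := PySem.List.pyGetD characters i ""
      (PySem.List.pyRange 0 number_of_colors 1).foldl (fun acc i =>
        let third := PySem.List.pyGetD characters i ""
        (PySem.List.pyRange 0 number_of_colors 1).foldl (fun acc i =>
          let fourth := PySem.List.pyGetD characters i ""
          acc ++ [[first, second, third, fourth]]) acc) acc) acc) []

-- ===== PORT B =====
def pvBuild (characters : List String) : Nat → List String → List (List String)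
  | 0, prefixx => [prefixx]
  | k + 1, prefixx =>
      characters.foldl (fun out c => out ++ pvBuild characters k (prefixx ++ [c])) []

def generatecombinationslist_alt (number_of_colors : Int) : List (List String) :=
  let characters := (PySem.List.pyRange 0 number_of_colors 1).map pvLowerAt
  pvBuild characters 4 []

-- ===== PRECONDITION & SPEC =====
-- Pre_ excludes number_of_colors > 26, where A raises IndexError on string.ascii_lowercase[i].
def Pre_generatecombinationslist (number_of_colors : Int) : Prop := number_of_colors ≤ 26
instance (number_of_colors : Int) : Decidable (Pre_generatecombinationslist number_of_colors) := by unfold Pre_generatecombinationslist; infer_instance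
def pvWitness_generatecombinationslist : Int := (3)

def Spec_generatecombinationslist (number_of_colors : Int) (out : List (List String)) : Prop := out = generatecombinationslist_alt number_of_colors
instance (number_of_colors : Int) (out : List (List String)) : Decidable (Spec_generatecombinationslist number_of_colors out) := by unfold Spec_generatecombinationslist; infer_instance

-- ===== CLAIM (what is proved, stated in full; the proofs are below) =====
def Claim_equal_generatecombinationslist : Prop := ∀ (number_of_colors : Int), Dom_generatecombinationslist number_of_colors → Pre_generatecombinationslist number_of_colors → Spec_generatecombinationslist number_of_colors (generatecombinationslist number_of_colors)

-- ===== LEMMAS AND PROOFS =====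

-- flatten of a map to singletons is a map (results.append of one combination per iteration)
theorem pvFlattenSingleton {A B : Type} (g : A -> List B) (l : List A) :
    (List.map (fun x => [g x]) l).flatten = List.map g l := by
  induction l with
  | nil => rfl
  | cons x xs ih => simp [ih]

-- ===== VERDICT (by name: the statement is the Claim_ definition above) =====
theorem generatecombinationslist_spec : Claim_equal_generatecombinationslist := by
  intro n _ _
  unfold Spec_generatecombinationslist generatecombinationslist generatecombinationslist_alt
  by_cases h : n ≤ 0
  · rw [PySem.List.pyRange_one_eq_nil h]
    simp [pvBuild]
  · simp only [PySem.List.foldl_append_singleton_eq_map, List.nil_append]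
    simp [pvBuild]
    apply congrArg List.flatten
    apply List.map_congr_left; intro a ha
    apply congrArg List.flatten
    apply List.map_congr_left; intro b hb
    apply congrArg List.flatten
    apply List.map_congr_left; intro c hc
    simp only [Function.comp_def, pvFlattenSingleton]
    apply List.map_congr_left; intro d hd
    rw [PySem.List.mem_pyRange_one] at ha hb hc hd
    rw [PySem.List.pyGetD_map_pyRange_of_nonneg pvLowerAt n a "" ha.1 ha.2,
        PySem.List.pyGetD_map_pyRange_of_nonneg pvLowerAt n b "" hb.1 hb.2,
        PySem.List.pyGetD_map_pyRange_of_nonneg pvLowerAt n c "" hc.1 hc.2,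
        PySem.List.pyGetD_map_pyRange_of_nonneg pvLowerAt n d "" hd.1 hd.2]
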